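-- pv_equiv track=rewrite | github.com/dannyanny1212/danny-toolkit | danny_toolkit/brain/nexus_bridge.py | _bepaal_prioriteit
-- ===== SOURCE A (Python) =====
-- def _bepaal_prioriteit(tekst: str) -> int:
--     """Bepaal prioriteit van een inzicht (1-10)."""
--     tekst_lower = tekst.lower()
--
--     # Hoge prioriteit keywords
--     if any(w in tekst_lower for w in ["streak", "gevaar", "dringend", "nu"]):
--         return 9
--     if any(w in tekst_lower for w in ["daalt", "probleem", "mis"]):
--         return 7
--     if any(w in tekst_lower for w in ["budget", "uitgaven"]):
--         return 6
--     if any(w in tekst_lower for w in ["tip", "suggestie"]):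
--         return 4
--
--     return 5
-- ===== SOURCE B (Python) =====
-- PRIORITEIT = {
--     "streak": 9, "gevaar": 9, "dringend": 9, "nu": 9,
--     "daalt": 7, "probleem": 7, "mis": 7,
--     "budget": 6, "uitgaven": 6,
--     "tip": 4, "suggestie": 4,
-- }
--
--
-- def _bepaal_prioriteit(tekst: str) -> int:
--     """Bepaal prioriteit van een inzicht (1-10)."""
--     t = tekst.lower()
--     return max((p for w, p in PRIORITEIT.items() if w in t), default=5)
-- ===== Notes on version B (the rewrite author's own statement) =====
-- stated objective: alternative
-- what changed: Replaces the ordered if-cascade (first matching group wins) by a flat keyword-to-priority map scanned in one pass taking the MAX matched priority (default 5); equivalent because the cascade's groups are checked in strictly descending priority order, so the first match is exactly the maximum matched priority.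
import Mathlib
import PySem

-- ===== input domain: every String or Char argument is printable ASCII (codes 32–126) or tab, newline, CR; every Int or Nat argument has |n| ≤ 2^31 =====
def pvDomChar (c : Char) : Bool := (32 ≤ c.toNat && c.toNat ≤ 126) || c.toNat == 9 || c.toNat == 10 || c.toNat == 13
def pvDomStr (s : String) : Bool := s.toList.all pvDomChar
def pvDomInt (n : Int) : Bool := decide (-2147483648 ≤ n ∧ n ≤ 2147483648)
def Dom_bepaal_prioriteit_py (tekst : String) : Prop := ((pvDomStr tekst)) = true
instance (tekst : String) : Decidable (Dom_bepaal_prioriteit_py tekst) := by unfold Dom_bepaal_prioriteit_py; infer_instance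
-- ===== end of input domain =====

-- B replaces the ordered if-cascade by one pass over a flat keyword->priority map taking the max matched priority (alternative; same cost); equivalent since the cascade checks groups in strictly descending priority.


-- ===== PORT A =====
def bepaal_prioriteit_py (tekst : String) : Int :=
  let tekst_lower := PySem.Str.lower tekst
  if ["streak", "gevaar", "dringend", "nu"].any (fun w => PySem.Str.isIn w tekst_lower) then 9
  else if ["daalt", "probleem", "mis"].any (fun w => PySem.Str.isIn w tekst_lower) then 7
  else if ["budget", "uitgaven"].any (fun w => PySem.Str.isIn w tekst_lower) then 6
  else if ["tip", "suggestie"].any (fun w => PySem.Str.isIn w tekst_lower) then 4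
  else 5

-- ===== PORT B =====
-- the PRIORITEIT dict of Source B, in insertion order
def pvPrioriteit : List (String × Int) :=
  [("streak", 9), ("gevaar", 9), ("dringend", 9), ("nu", 9),
   ("daalt", 7), ("probleem", 7), ("mis", 7),
   ("budget", 6), ("uitgaven", 6),
   ("tip", 4), ("suggestie", 4)]

-- max(gen, default=5): max? of the matched priorities, 5 when none matched
def bepaal_prioriteit_py_alt (tekst : String) : Int :=
  let t := PySem.Str.lower tekst
  let matched := pvPrioriteit.filterMap (fun wp => if PySem.Str.isIn wp.1 t then some wp.2 else none)
  match PySem.List.max? matched (fun x => x) with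
  | some m => m
  | none => 5

-- ===== PRECONDITION & SPEC =====
def Spec_bepaal_prioriteit_py (tekst : String) (out : Int) : Prop := out = bepaal_prioriteit_py_alt tekst
instance (tekst : String) (out : Int) : Decidable (Spec_bepaal_prioriteit_py tekst out) := by unfold Spec_bepaal_prioriteit_py; infer_instance

-- ===== CLAIM (what is proved, stated in full; the proofs are below) =====
def Claim_equal_bepaal_prioriteit_py : Prop := ∀ (tekst : String), Dom_bepaal_prioriteit_py tekst → Spec_bepaal_prioriteit_py tekst (bepaal_prioriteit_py tekst)

-- ===== LEMMAS AND PROOFS =====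

-- the matched-priorities list of port B
def pvMatched (t : String) : List Int :=
  pvPrioriteit.filterMap (fun wp => if PySem.Str.isIn wp.1 t then some wp.2 else none)

theorem pvAlt_eq (tekst : String) :
    bepaal_prioriteit_py_alt tekst =
      match PySem.List.max? (pvMatched (PySem.Str.lower tekst)) (fun x => x) with
      | some m => m
      | none => 5 := rfl

-- max(l, default) equals v when v is a member and an upper bound
theorem pvMax_eq (l : List Int) (v : Int) (hv : v ∈ l) (hub : ∀ m ∈ l, m ≤ v) :
    (match PySem.List.max? l (fun x => x) with | some m => m | none => (5 : Int)) = v := by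
  cases h : PySem.List.max? l (fun x => x) with
  | none =>
      rw [PySem.List.max?_eq_none_iff] at h
      subst h; simp at hv
  | some m =>
      have hmem : m ∈ l := PySem.List.max?_mem h
      have hle : m ≤ v := hub m hmem
      have hge : v ≤ m := PySem.List.max?_isMax h v hv
      simpa using le_antisymm hle hge

-- a matched priority comes from a keyword pair of the table
theorem pvMatched_src (t : String) (m : Int) (hm : m ∈ pvMatched t) :
    ∃ wp ∈ pvPrioriteit, PySem.Str.isIn wp.1 t = true ∧ wp.2 = m := by
  rcases List.mem_filterMap.mp hm with ⟨wp, hwp, hf⟩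
  by_cases hc : PySem.Str.isIn wp.1 t = true
  · rw [if_pos hc] at hf
    exact ⟨wp, hwp, hc, Option.some.inj hf⟩
  · rw [if_neg hc] at hf
    cases hf

-- a matched keyword puts its priority in the matched list
theorem pvMatched_of (t : String) (wp : String × Int) (hwp : wp ∈ pvPrioriteit)
    (hc : PySem.Str.isIn wp.1 t = true) : wp.2 ∈ pvMatched t :=
  List.mem_filterMap.mpr ⟨wp, hwp, by rw [if_pos hc]⟩

-- ===== VERDICT (by name: the statement is the Claim_ definition above) =====
theorem bepaal_prioriteit_py_spec : Claim_equal_bepaal_prioriteit_py := by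
  intro tekst _
  unfold Spec_bepaal_prioriteit_py bepaal_prioriteit_py
  rw [pvAlt_eq]
  set t := PySem.Str.lower tekst with ht
  simp only [List.any_cons, List.any_nil, Bool.or_false]
  by_cases h1 : (PySem.Str.isIn "streak" t || (PySem.Str.isIn "gevaar" t ||
      (PySem.Str.isIn "dringend" t || PySem.Str.isIn "nu" t))) = true
  · simp only [Bool.or_eq_true] at h1
    rcases h1 with hw | hw | hw | hw <;>
    · rw [if_pos (show _ = true by simp only [hw, Bool.true_or, Bool.or_true])]
      refine (pvMax_eq _ 9 (pvMatched_of t (_, 9) (by simp [pvPrioriteit]) hw) ?_).symm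
      intro m hm
      rcases pvMatched_src t m hm with ⟨wp, hwp, hin, hv⟩
      fin_cases hwp <;> omega
  · rw [if_neg h1]
    have hOr := Bool.eq_false_iff.mpr h1
    simp only [Bool.or_eq_false_iff] at hOr
    obtain ⟨hs, hg, hd, hn⟩ := hOr
    by_cases h2 : (PySem.Str.isIn "daalt" t || (PySem.Str.isIn "probleem" t ||
        PySem.Str.isIn "mis" t)) = true
    · simp only [Bool.or_eq_true] at h2
      rcases h2 with hw | hw | hw <;>
      · rw [if_pos (show _ = true by simp only [hw, Bool.true_or, Bool.or_true])]
        refine (pvMax_eq _ 7 (pvMatched_of t (_, 7) (by simp [pvPrioriteit]) hw) ?_).symm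
        intro m hm
        rcases pvMatched_src t m hm with ⟨wp, hwp, hin, hv⟩
        fin_cases hwp <;> simp_all <;> omega
    · rw [if_neg h2]
      have hOr2 := Bool.eq_false_iff.mpr h2
      simp only [Bool.or_eq_false_iff] at hOr2
      obtain ⟨hda, hp, hmi⟩ := hOr2
      by_cases h3 : (PySem.Str.isIn "budget" t || PySem.Str.isIn "uitgaven" t) = true
      · simp only [Bool.or_eq_true] at h3
        rcases h3 with hw | hw <;>
        · rw [if_pos (show _ = true by simp only [hw, Bool.true_or, Bool.or_true])]
          refine (pvMax_eq _ 6 (pvMatched_of t (_, 6) (by simp [pvPrioriteit]) hw) ?_).symm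
          intro m hm
          rcases pvMatched_src t m hm with ⟨wp, hwp, hin, hv⟩
          fin_cases hwp <;> simp_all <;> omega
      · rw [if_neg h3]
        have hOr3 := Bool.eq_false_iff.mpr h3
        simp only [Bool.or_eq_false_iff] at hOr3
        obtain ⟨hb, hu⟩ := hOr3
        by_cases h4 : (PySem.Str.isIn "tip" t || PySem.Str.isIn "suggestie" t) = true
        · simp only [Bool.or_eq_true] at h4
          rcases h4 with hw | hw <;>
          · rw [if_pos (show _ = true by simp only [hw, Bool.true_or, Bool.or_true])]
            refine (pvMax_eq _ 4 (pvMatched_of t (_, 4) (by simp [pvPrioriteit]) hw) ?_).symm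
            intro m hm
            rcases pvMatched_src t m hm with ⟨wp, hwp, hin, hv⟩
            fin_cases hwp <;> simp_all
        · rw [if_neg h4]
          have hOr4 := Bool.eq_false_iff.mpr h4
          simp only [Bool.or_eq_false_iff] at hOr4
          obtain ⟨hti, hsu⟩ := hOr4
          have hM : pvMatched t = [] := by
            rw [pvMatched, List.filterMap_eq_nil_iff]
            intro wp hwp
            fin_cases hwp <;> simp_all
          rw [hM, show PySem.List.max? ([] : List Int) (fun x => x) = none from
            Iff.mpr (PySem.List.max?_eq_none_iff _ _) rfl]
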